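-- pv_equiv track=rewrite | github.com/tamiliam/HalaTuju | halatuju_api/apps/courses/stpm_ranking.py | _get_riasec_alignment
-- ===== SOURCE A (Python) =====
-- from typing import Dict, List, Tuple
--
-- RIASEC_PRIMARY_MATCH = 6
--
-- RIASEC_SECONDARY_MATCH = 3
--
-- RIASEC_CROSS_MATCH = 2
--
-- RIASEC_ALIGNMENT_CAP = 8
--
-- def _get_riasec_alignment(
--     course_riasec_type: str,
--     signals: Dict,
-- ) -> Tuple[float, str]:
--     """
--     Calculate RIASEC alignment score.
--
--     Course riasec_type matches student's primary seed: +6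
--     Matches secondary seed: +3
--     Matches cross-domain Q5: +2
--     Capped at +8.
--     """
--     if not course_riasec_type:
--         return 0, ''
--
--     score = 0
--     riasec_seed = signals.get('riasec_seed', {})
--
--     if riasec_seed:
--         # Find primary and secondary seed types
--         sorted_seeds = sorted(riasec_seed.items(), key=lambda x: -x[1])
--         primary_types = []
--         secondary_types = []
--
--         if sorted_seeds:
--             max_score = sorted_seeds[0][1]
--             primary_types = [
--                 sig.replace('riasec_', '')
--                 for sig, s in sorted_seeds if s == max_score
--             ]
--             if len(sorted_seeds) > len(primary_types):
--                 next_score = sorted_seeds[len(primary_types)][1]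
--                 secondary_types = [
--                     sig.replace('riasec_', '')
--                     for sig, s in sorted_seeds
--                     if s == next_score and s < max_score
--                 ]
--
--         if course_riasec_type in primary_types:
--             score += RIASEC_PRIMARY_MATCH
--         elif course_riasec_type in secondary_types:
--             score += RIASEC_SECONDARY_MATCH
--
--     # Cross-domain Q5 match
--     cross_signals = signals.get('cross_domain', {})
--     for sig_name in cross_signals:
--         cross_type = sig_name.replace('cross_', '')
--         if cross_type == course_riasec_type:
--             score += RIASEC_CROSS_MATCH
--             break
--
--     return min(score, RIASEC_ALIGNMENT_CAP), 'RIASEC alignment' if score > 0 else ''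
-- ===== SOURCE B (Python) =====
-- def _get_riasec_alignment(course_riasec_type, signals):
--     """Direct max-based lookup: no sorting of the seed signals."""
--     if not course_riasec_type:
--         return 0, ''
--
--     score = 0
--     seed = signals.get('riasec_seed', {})
--     if seed:
--         max_s = max(seed.values())
--         matched = [s for sig, s in seed.items()
--                    if sig.replace('riasec_', '') == course_riasec_type]
--         if max_s in matched:
--             score += 6
--         else:
--             below = [s for s in seed.values() if s < max_s]
--             if below and max(below) in matched:
--                 score += 3
--
--     if any(sig.replace('cross_', '') == course_riasec_type
--            for sig in signals.get('cross_domain', {})):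
--         score += 2
--
--     return min(score, 8), 'RIASEC alignment' if score > 0 else ''
-- ===== Notes on version B (the rewrite author's own statement) =====
-- stated objective: simpler
-- what changed: B drops A's sort-then-index pass over the seed signals and instead computes the maximum seed value and the largest strictly-below-maximum value directly with single scans, testing the course type against them; the cross-domain check becomes a plain any().
import Mathlib
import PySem

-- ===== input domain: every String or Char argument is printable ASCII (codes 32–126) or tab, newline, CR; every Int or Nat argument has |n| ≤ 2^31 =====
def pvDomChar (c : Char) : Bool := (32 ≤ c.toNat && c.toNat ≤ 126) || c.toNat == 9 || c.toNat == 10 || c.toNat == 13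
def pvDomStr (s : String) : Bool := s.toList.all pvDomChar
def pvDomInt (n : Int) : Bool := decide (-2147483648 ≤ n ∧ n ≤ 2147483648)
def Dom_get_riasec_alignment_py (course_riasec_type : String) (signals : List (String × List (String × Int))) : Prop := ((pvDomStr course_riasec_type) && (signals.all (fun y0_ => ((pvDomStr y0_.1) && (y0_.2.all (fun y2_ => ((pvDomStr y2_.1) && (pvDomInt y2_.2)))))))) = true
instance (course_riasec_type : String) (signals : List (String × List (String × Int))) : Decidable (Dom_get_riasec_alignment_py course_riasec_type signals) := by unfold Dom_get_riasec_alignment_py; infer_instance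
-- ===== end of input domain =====

-- B replaces A's sort-then-index pass over the seed signals by direct max / second-max
-- computations (objective: simpler, no sorting).  Return-value equivalence is proved for
-- all inputs; neither program mutates its arguments.

-- ===== PORT A =====

-- the 'for sig_name in cross_signals: … break' loop of A
def pvCrossA (course_riasec_type : String) : List (String × Int) → Int → Int
  | [], score => score
  | (sig_name, _) :: rest, score =>
      if PySem.Str.replace sig_name "cross_" "" = course_riasec_type then score + 2
      else pvCrossA course_riasec_type rest score

-- the body of A's 'if riasec_seed:' block (score contribution of the seed signals)
def pvSeedA (course_riasec_type : String) (riasec_seed : List (String × Int)) : Int :=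
  if riasec_seed ≠ [] then
    let sorted_seeds := PySem.List.sorted riasec_seed (fun x => -x.2) false
    match sorted_seeds with
    | [] => 0
    | s0 :: _ =>
      let max_score := s0.2
      let primary_types := (sorted_seeds.filter (fun p => p.2 == max_score)).map
          (fun p => PySem.Str.replace p.1 "riasec_" "")
      let secondary_types :=
        if sorted_seeds.length > primary_types.length then
          let next_score := (PySem.List.pyGetD sorted_seeds (primary_types.length : Int) ("", 0)).2
          (sorted_seeds.filter (fun p => p.2 == next_score && decide (p.2 < max_score))).map
              (fun p => PySem.Str.replace p.1 "riasec_" "")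
        else []
      if course_riasec_type ∈ primary_types then 6
      else if course_riasec_type ∈ secondary_types then 3
      else 0
  else 0

def get_riasec_alignment_py (course_riasec_type : String) (signals : List (String × List (String × Int))) : Int × String :=
  if course_riasec_type = "" then (0, "")
  else
    let riasec_seed := (PySem.Dict.mk signals).getD "riasec_seed" []
    let score := pvSeedA course_riasec_type riasec_seed
    let cross_signals := (PySem.Dict.mk signals).getD "cross_domain" []
    let score2 := pvCrossA course_riasec_type cross_signals score
    (min score2 8, if score2 > 0 then "RIASEC alignment" else "")

-- ===== PORT B =====

-- the body of B's 'if seed:' block: direct max / strictly-below-max lookup, no sort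
def pvSeedB (course_riasec_type : String) (seed : List (String × Int)) : Int :=
  if seed ≠ [] then
    match seed.map (fun p => p.2) with
    | [] => 0
    | v :: vs =>
      let max_s := vs.foldl max v
      let matched := (seed.filter
          (fun p => PySem.Str.replace p.1 "riasec_" "" == course_riasec_type)).map (fun p => p.2)
      if max_s ∈ matched then 6
      else
        match (seed.map (fun p => p.2)).filter (fun s => decide (s < max_s)) with
        | [] => 0
        | b :: bs => if bs.foldl max b ∈ matched then 3 else 0
  else 0

def get_riasec_alignment_py_alt (course_riasec_type : String) (signals : List (String × List (String × Int))) : Int × String :=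
  if course_riasec_type = "" then (0, "")
  else
    let seed := (PySem.Dict.mk signals).getD "riasec_seed" []
    let score := pvSeedB course_riasec_type seed
    let cross := (PySem.Dict.mk signals).getD "cross_domain" []
    let score2 :=
      if cross.any (fun p => PySem.Str.replace p.1 "cross_" "" == course_riasec_type)
      then score + 2 else score
    (min score2 8, if score2 > 0 then "RIASEC alignment" else "")

-- ===== PRECONDITION & SPEC =====
def Spec_get_riasec_alignment_py (course_riasec_type : String) (signals : List (String × List (String × Int))) (out : Int × String) : Prop := out = get_riasec_alignment_py_alt course_riasec_type signals
instance (course_riasec_type : String) (signals : List (String × List (String × Int))) (out : Int × String) : Decidable (Spec_get_riasec_alignment_py course_riasec_type signals out) := by unfold Spec_get_riasec_alignment_py; infer_instance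

-- ===== CLAIM (what is proved, stated in full; the proofs are below) =====
def Claim_equal_get_riasec_alignment_py : Prop := ∀ (course_riasec_type : String) (signals : List (String × List (String × Int))), Dom_get_riasec_alignment_py course_riasec_type signals → Spec_get_riasec_alignment_py course_riasec_type signals (get_riasec_alignment_py course_riasec_type signals)

-- ===== LEMMAS AND PROOFS =====

-- the early-exit cross-domain loop of A is B's 'any' test
theorem pvCrossA_eq (c : String) (l : List (String × Int)) (s : Int) :
    pvCrossA c l s =
      if l.any (fun p => PySem.Str.replace p.1 "cross_" "" == c) then s + 2 else s := by
  induction l with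
  | nil => simp [pvCrossA]
  | cons p rest ih =>
    obtain ⟨k, v⟩ := p
    rw [List.any_cons]
    by_cases h : PySem.Str.replace k "cross_" "" = c
    · rw [pvCrossA, if_pos h,
        show (PySem.Str.replace ((k, v) : String × Int).1 "cross_" "" == c) = true from
          beq_iff_eq.mpr h, Bool.true_or, if_pos rfl]
    · rw [pvCrossA, if_neg h, ih,
        show (PySem.Str.replace ((k, v) : String × Int).1 "cross_" "" == c) = false from
          beq_eq_false_iff_ne.mpr h, Bool.false_or]

-- a maximum of a list is unique
theorem max_eq_of_mem_ub {xs : List Int} {a b : Int}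
    (ha : a ∈ xs) (hua : ∀ y ∈ xs, y ≤ a) (hb : b ∈ xs) (hub : ∀ y ∈ xs, y ≤ b) : a = b :=
  le_antisymm (hub a ha) (hua b hb)

-- filtering values commutes with projecting them
theorem filter_map_vals (P : Int → Bool) (l : List (String × Int)) :
    (l.map (fun p => p.2)).filter P = (l.filter (fun p => P p.2)).map (fun p => p.2) := by
  induction l with
  | nil => rfl
  | cons p rest ih =>
    by_cases h : P p.2 <;> simp [h, ih]

-- in a value-descending list bounded by M, the entries with value M form a prefix:
-- dropping as many entries as there are M-valued ones leaves exactly the below-M entries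
theorem drop_filter_descend (M : Int) (ss : List (String × Int))
    (hpw : ss.Pairwise (fun a b => b.2 ≤ a.2)) (hub : ∀ p ∈ ss, p.2 ≤ M) :
    ss.drop (ss.filter (fun p => p.2 == M)).length = ss.filter (fun p => decide (p.2 < M)) := by
  induction ss with
  | nil => rfl
  | cons p rest ih =>
    rcases List.pairwise_cons.mp hpw with ⟨hall, hrest⟩
    have hpub : p.2 ≤ M := hub p (List.mem_cons_self ..)
    by_cases hM : p.2 = M
    · rw [List.filter_cons_of_pos (by simp [hM]), List.length_cons, List.drop_succ_cons,
        ih hrest (fun q hq => hub q (List.mem_cons_of_mem _ hq)),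
        List.filter_cons_of_neg (by simp [hM])]
    · have hlt : p.2 < M := lt_of_le_of_ne hpub hM
      have hallM : ∀ q ∈ rest, q.2 < M := fun q hq => lt_of_le_of_lt (hall q hq) hlt
      have h1 : rest.filter (fun p => p.2 == M) = [] :=
        List.filter_eq_nil_iff.mpr (fun q hq => by simp [Int.ne_of_lt (hallM q hq)])
      have h2 : rest.filter (fun p => decide (p.2 < M)) = rest :=
        List.filter_eq_self.mpr (fun q hq => by simp [hallM q hq])
      rw [List.filter_cons_of_neg (by simp [hM]), h1, List.length_nil, List.drop_zero,
        List.filter_cons_of_pos (by simp [hlt]), h2]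

-- the seed-signal score: sort-free B computes A's sorted-scan result
theorem pvSeed_eq (c : String) (l : List (String × Int)) :
    pvSeedA c l = pvSeedB c l := by
  cases l with
  | nil => rfl
  | cons p0 rest =>
    have hlne : (p0 :: rest : List (String × Int)) ≠ [] := by simp
    cases hss : PySem.List.sorted (p0 :: rest) (fun x => -x.2) false with
    | nil => exact absurd ((PySem.List.sorted_eq_nil_iff _ _ _).mp hss) hlne
    | cons s0 t =>
    have hperm : (s0 :: t).Perm (p0 :: rest) :=
      hss ▸ PySem.List.sorted_perm (p0 :: rest) (fun x => -x.2) false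
    have hpw : (s0 :: t).Pairwise (fun a b => b.2 ≤ a.2) := by
      have h := PySem.List.sorted_pairwise (p0 :: rest) (fun x => -x.2)
      rw [hss] at h
      exact h.imp (fun hab => by have h2 : -_ ≤ -_ := hab; omega)
    have hub : ∀ p ∈ (p0 :: rest), p.2 ≤ s0.2 := by
      intro p hp
      have h2 : -s0.2 ≤ -p.2 := PySem.List.key_head_sorted_le _ _ hss p hp
      omega
    have hvmem : (rest.map (fun p => p.2)).foldl max p0.2 ∈ (p0 :: rest).map (fun p => p.2) := by
      rcases PySem.List.foldl_max_mem (rest.map (fun p => p.2)) p0.2 with h | h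
      · rw [List.map_cons, h]; exact List.mem_cons_self ..
      · rw [List.map_cons]; exact List.mem_cons_of_mem _ h
    have hvub : ∀ y ∈ (p0 :: rest).map (fun p => p.2),
        y ≤ (rest.map (fun p => p.2)).foldl max p0.2 := by
      intro y hy
      rw [List.map_cons] at hy
      rcases List.mem_cons.mp hy with rfl | h
      · exact (PySem.List.le_foldl_max _ _).1
      · exact (PySem.List.le_foldl_max _ _).2 y h
    have hs0mem : s0 ∈ (p0 :: rest) := hperm.subset (List.mem_cons_self ..)
    have hMv : (rest.map (fun p => p.2)).foldl max p0.2 = s0.2 := by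
      obtain ⟨q, hq, hq2⟩ := List.mem_map.mp hvmem
      exact le_antisymm (hq2 ▸ hub q hq) (hvub s0.2 (List.mem_map.mpr ⟨s0, hs0mem, rfl⟩))
    simp only [pvSeedA, pvSeedB, hss, List.map_cons, hMv]
    rw [if_pos hlne, if_pos hlne]
    have hPA : (c ∈ List.map (fun p => PySem.Str.replace p.1 "riasec_" "")
        (List.filter (fun p => p.2 == s0.2) (s0 :: t))) ↔
        (∃ p ∈ p0 :: rest, p.2 = s0.2 ∧ PySem.Str.replace p.1 "riasec_" "" = c) := by
      simp only [List.mem_map, List.mem_filter, beq_iff_eq]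
      constructor
      · rintro ⟨p, ⟨hp, hpM⟩, hpc⟩
        exact ⟨p, hperm.subset hp, hpM, hpc⟩
      · rintro ⟨p, hp, hpM, hpc⟩
        exact ⟨p, ⟨hperm.mem_iff.mpr hp, hpM⟩, hpc⟩
    have hPB : (s0.2 ∈ List.map (fun p => p.2)
        (List.filter (fun p => PySem.Str.replace p.1 "riasec_" "" == c) (p0 :: rest))) ↔
        (∃ p ∈ p0 :: rest, p.2 = s0.2 ∧ PySem.Str.replace p.1 "riasec_" "" = c) := by
      simp only [List.mem_map, List.mem_filter, beq_iff_eq]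
      constructor
      · rintro ⟨p, ⟨hp, hpc⟩, hpM⟩
        exact ⟨p, hp, hpM, hpc⟩
      · rintro ⟨p, hp, hpM, hpc⟩
        exact ⟨p, ⟨hp, hpc⟩, hpM⟩
    by_cases hP : ∃ p ∈ p0 :: rest, p.2 = s0.2 ∧ PySem.Str.replace p.1 "riasec_" "" = c
    · rw [if_pos (hPA.mpr hP), if_pos (hPB.mpr hP)]
    rw [if_neg (fun h => hP (hPA.mp h)), if_neg (fun h => hP (hPB.mp h))]
    have hdrop := drop_filter_descend s0.2 (s0 :: t) hpw (fun p hp => hub p (hperm.subset hp))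
    have hfperm : (List.filter (fun p => decide (p.2 < s0.2)) (s0 :: t)).Perm
        (List.filter (fun p => decide (p.2 < s0.2)) (p0 :: rest)) := hperm.filter _
    rw [show (p0.2 :: List.map (fun p => p.2) rest) =
          List.map (fun p => p.2) (p0 :: rest) from rfl,
        filter_map_vals]
    simp only [List.length_map]
    cases hF : List.filter (fun p => decide (p.2 < s0.2)) (s0 :: t) with
    | nil =>
      have hFl : List.filter (fun p => decide (p.2 < s0.2)) (p0 :: rest) = [] := by
        have := hfperm.length_eq
        rw [hF] at this
        exact List.eq_nil_of_length_eq_zero this.symm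
      have hng : ¬ ((s0 :: t).length > (List.filter (fun p => p.2 == s0.2) (s0 :: t)).length) := by
        rw [gt_iff_lt, not_lt, ← List.drop_eq_nil_iff, hdrop, hF]
      rw [if_neg hng, hFl]
      simp
    | cons b0 brest =>
      have hguard : (s0 :: t).length > (List.filter (fun p => p.2 == s0.2) (s0 :: t)).length := by
        rw [gt_iff_lt, ← not_le, ← List.drop_eq_nil_iff, hdrop, hF]
        simp
      rw [if_pos hguard]
      have hb0F : b0 ∈ List.filter (fun p => decide (p.2 < s0.2)) (s0 :: t) := by
        rw [hF]; exact List.mem_cons_self ..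
      have hb0lt : b0.2 < s0.2 := by
        have h := (List.mem_filter.mp hb0F).2
        simpa using h
      have hnext : PySem.List.pyGetD (s0 :: t)
          (↑(List.filter (fun p => p.2 == s0.2) (s0 :: t)).length) ("", 0) = b0 := by
        rw [PySem.List.pyGetD_natCast, List.getD_eq_getElem?_getD, ← List.head?_drop, hdrop, hF]
        rfl
      rw [hnext]
      have hFlne : List.filter (fun p => decide (p.2 < s0.2)) (p0 :: rest) ≠ [] := by
        intro h
        have hlen := hfperm.length_eq
        rw [hF, h] at hlen
        simp at hlen
      cases hFl : List.filter (fun p => decide (p.2 < s0.2)) (p0 :: rest) with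
      | nil => exact absurd hFl hFlne
      | cons q0 qrest =>
      have hNmem : List.foldl max q0.2 (List.map (fun p => p.2) qrest) ∈
          List.map (fun p => p.2) (List.filter (fun p => decide (p.2 < s0.2)) (p0 :: rest)) := by
        rw [hFl, List.map_cons]
        rcases PySem.List.foldl_max_mem (List.map (fun p => p.2) qrest) q0.2 with h | h
        · rw [h]; exact List.mem_cons_self ..
        · exact List.mem_cons_of_mem _ h
      have hNub : ∀ y ∈ List.map (fun p => p.2)
          (List.filter (fun p => decide (p.2 < s0.2)) (p0 :: rest)),
          y ≤ List.foldl max q0.2 (List.map (fun p => p.2) qrest) := by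
        rw [hFl, List.map_cons]
        intro y hy
        rcases List.mem_cons.mp hy with rfl | h
        · exact (PySem.List.le_foldl_max _ _).1
        · exact (PySem.List.le_foldl_max _ _).2 y h
      have hfpw : List.Pairwise (fun a b => b.2 ≤ a.2)
          (List.filter (fun p => decide (p.2 < s0.2)) (s0 :: t)) := hpw.filter _
      rw [hF] at hfpw
      have hb0ub : ∀ q ∈ b0 :: brest, q.2 ≤ b0.2 := by
        intro q hq
        rcases List.mem_cons.mp hq with rfl | h
        · exact le_refl _
        · exact (List.pairwise_cons.mp hfpw).1 q h
      have hb0mem : b0.2 ∈ List.map (fun p => p.2)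
          (List.filter (fun p => decide (p.2 < s0.2)) (p0 :: rest)) :=
        List.mem_map.mpr ⟨b0, hfperm.subset hb0F, rfl⟩
      have hb0ubm : ∀ y ∈ List.map (fun p => p.2)
          (List.filter (fun p => decide (p.2 < s0.2)) (p0 :: rest)), y ≤ b0.2 := by
        intro y hy
        obtain ⟨q, hq, rfl⟩ := List.mem_map.mp hy
        have hqF : q ∈ b0 :: brest := by rw [← hF]; exact hfperm.mem_iff.mpr hq
        exact hb0ub q hqF
      have hNb0 : List.foldl max q0.2 (List.map (fun p => p.2) qrest) = b0.2 :=
        max_eq_of_mem_ub hNmem hNub hb0mem hb0ubm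
      rw [List.map_cons]
      have hSA : (c ∈ List.map (fun p => PySem.Str.replace p.1 "riasec_" "")
          (List.filter (fun p => p.2 == b0.2 && decide (p.2 < s0.2)) (s0 :: t))) ↔
          (∃ p ∈ p0 :: rest, p.2 = b0.2 ∧ PySem.Str.replace p.1 "riasec_" "" = c) := by
        simp only [List.mem_map, List.mem_filter, Bool.and_eq_true, beq_iff_eq,
          decide_eq_true_eq]
        constructor
        · rintro ⟨p, ⟨hp, hpM, _⟩, hpc⟩
          exact ⟨p, hperm.subset hp, hpM, hpc⟩
        · rintro ⟨p, hp, hpM, hpc⟩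
          exact ⟨p, ⟨hperm.mem_iff.mpr hp, hpM, hpM ▸ hb0lt⟩, hpc⟩
      have hSB : (b0.2 ∈ List.map (fun p => p.2)
          (List.filter (fun p => PySem.Str.replace p.1 "riasec_" "" == c) (p0 :: rest))) ↔
          (∃ p ∈ p0 :: rest, p.2 = b0.2 ∧ PySem.Str.replace p.1 "riasec_" "" = c) := by
        simp only [List.mem_map, List.mem_filter, beq_iff_eq]
        constructor
        · rintro ⟨p, ⟨hp, hpc⟩, hpM⟩
          exact ⟨p, hp, hpM, hpc⟩
        · rintro ⟨p, hp, hpM, hpc⟩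
          exact ⟨p, ⟨hp, hpc⟩, hpM⟩
      show _ = if List.foldl max q0.2 (List.map (fun p => p.2) qrest) ∈
          List.map (fun p => p.2)
            (List.filter (fun p => PySem.Str.replace p.1 "riasec_" "" == c) (p0 :: rest))
        then (3 : Int) else 0
      rw [hNb0]
      by_cases hS : ∃ p ∈ p0 :: rest, p.2 = b0.2 ∧ PySem.Str.replace p.1 "riasec_" "" = c
      · rw [if_pos (hSA.mpr hS), if_pos (hSB.mpr hS)]
      · rw [if_neg (fun h => hS (hSA.mp h)), if_neg (fun h => hS (hSB.mp h))]

-- ===== VERDICT (by name: the statement is the Claim_ definition above) =====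
theorem get_riasec_alignment_py_spec : Claim_equal_get_riasec_alignment_py := by
  intro c signals _
  unfold Spec_get_riasec_alignment_py get_riasec_alignment_py get_riasec_alignment_py_alt
  by_cases hc : c = ""
  · simp [hc]
  · simp only [hc, if_false]
    rw [pvCrossA_eq, pvSeed_eq]
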